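-- pv_equiv track=rewrite | github.com/MQFacultyOfArts/PromptGrimoireTool | src/promptgrimoire/input_pipeline/html_input.py | _collapsed_to_html_offset
-- ===== SOURCE A (Python) =====
-- _ENTITY_MAP: dict[str, str] = {
--     "&amp;": "&",
--     "&lt;": "<",
--     "&gt;": ">",
--     "&quot;": '"',
--     "&apos;": "'",
--     "&nbsp;": "\u00a0",
-- }
--
-- def _html_char_length(html_text: str, html_pos: int, decoded_char: str) -> int:
--     """Determine how many bytes in *html_text* correspond to one decoded char.
--
--     If ``html_text[html_pos]`` starts an entity (e.g. ``&amp;``), return the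
--     entity length.  Otherwise return 1.
--     """
--     if html_pos >= len(html_text):
--         return 1
--
--     if html_text[html_pos] == "&":
--         # Try to match a known entity
--         for entity, decoded in _ENTITY_MAP.items():
--             if html_text[html_pos:].startswith(entity) and decoded == decoded_char:
--                 return len(entity)
--         # Try numeric entity &#NNN; or &#xHHH;
--         semicolon = html_text.find(";", html_pos + 1)
--         if semicolon != -1 and semicolon - html_pos < 12:
--             return semicolon - html_pos + 1
--     return 1
--
-- def _collapsed_to_html_offset(
--     html_text: str, decoded_text: str, collapsed_offset: int
-- ) -> int:
--     """Map an offset in collapsed-decoded text to an offset in HTML-encoded text.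
--
--     Walks the decoded text (which has entities resolved, e.g. ``&`` not
--     ``&amp;``) applying whitespace collapsing.  Simultaneously advances
--     through the HTML text to track the corresponding byte position.
--     """
--     if collapsed_offset == 0:
--         return 0
--
--     collapsed_pos = 0
--     decoded_pos = 0
--     html_pos = 0
--     in_whitespace = False
--
--     while decoded_pos < len(decoded_text) and collapsed_pos < collapsed_offset:
--         ch = decoded_text[decoded_pos]
--         is_ws = ch in (" ", "\t", "\n", "\r", "\u00a0") or ch.isspace()
--
--         html_char_len = _html_char_length(html_text, html_pos, ch)
--
--         if is_ws:
--             if not in_whitespace: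
--                 collapsed_pos += 1
--                 in_whitespace = True
--             html_pos += html_char_len
--             decoded_pos += 1
--         else:
--             collapsed_pos += 1
--             html_pos += html_char_len
--             decoded_pos += 1
--             in_whitespace = False
--
--     return html_pos
-- ===== SOURCE B (Python) =====
-- _ENTITY_ITEMS = [
--     ("&amp;", "&"),
--     ("&lt;", "<"),
--     ("&gt;", ">"),
--     ("&quot;", '"'),
--     ("&apos;", "'"),
--     ("&nbsp;", "\u00a0"),
-- ]
-- _WS = (" ", "\t", "\n", "\r", "\u00a0")
--
--
-- def _char_len(html_text, pos, ch):
--     """Length in html_text of the encoding of one decoded char at pos."""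
--     if pos < len(html_text) and html_text[pos] == "&":
--         for entity, decoded in _ENTITY_ITEMS:
--             if decoded == ch and html_text.startswith(entity, pos):
--                 return len(entity)
--         k = html_text[pos + 1 : pos + 12].find(";")
--         if k != -1:
--             return k + 2
--     return 1
--
--
-- def _is_ws(ch):
--     return ch in _WS or ch.isspace()
--
--
-- def _collapsed_to_html_offset(html_text, decoded_text, collapsed_offset):
--     n = len(decoded_text)
--     html_pos = 0
--     i = 0
--     collapsed = 0
--     while i < n and collapsed < collapsed_offset:
--         ch = decoded_text[i]
--         if _is_ws(ch):
--             collapsed += 1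
--             html_pos += _char_len(html_text, html_pos, ch)
--             i += 1
--             if collapsed < collapsed_offset:
--                 # absorb the rest of this whitespace run in one inner sweep
--                 while i < n and _is_ws(decoded_text[i]):
--                     html_pos += _char_len(html_text, html_pos, decoded_text[i])
--                     i += 1
--         else:
--             collapsed += 1
--             html_pos += _char_len(html_text, html_pos, ch)
--             i += 1
--     return html_pos
-- ===== Notes on version B (the rewrite author's own statement) =====
-- stated objective: alternative
-- what changed: B replaces A's per-character remaining-string slice (html_text[html_pos:].startswith and unbounded find(';')) by an offset startswith and a bounded 11-char window, and absorbs each whitespace run in one inner sweep instead of carrying an in_whitespace flag.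
import Mathlib
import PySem

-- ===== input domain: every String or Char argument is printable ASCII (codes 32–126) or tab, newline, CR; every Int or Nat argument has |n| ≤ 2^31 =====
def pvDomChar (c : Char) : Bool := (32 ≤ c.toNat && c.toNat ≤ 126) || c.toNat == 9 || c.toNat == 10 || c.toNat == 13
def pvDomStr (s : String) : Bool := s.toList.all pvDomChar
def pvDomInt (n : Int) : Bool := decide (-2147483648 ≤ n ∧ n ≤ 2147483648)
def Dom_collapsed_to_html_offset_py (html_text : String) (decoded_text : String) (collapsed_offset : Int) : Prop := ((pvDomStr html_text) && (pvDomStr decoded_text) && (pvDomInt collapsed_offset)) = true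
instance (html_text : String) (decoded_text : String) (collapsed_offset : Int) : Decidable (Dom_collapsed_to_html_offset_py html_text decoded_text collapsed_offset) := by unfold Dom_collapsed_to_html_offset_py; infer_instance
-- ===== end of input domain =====

-- B replaces A's per-character remaining-string slice by an offset startswith / bounded
-- 11-char window and absorbs each whitespace run in one inner sweep (objective: alternative).

-- shared module constant _ENTITY_MAP (insertion order) and the whitespace test used by both
def pvEntities : List (List Char × Char) :=
  [(['&','a','m','p',';'], '&'), (['&','l','t',';'], '<'), (['&','g','t',';'], '>'),
   (['&','q','u','o','t',';'], '"'), (['&','a','p','o','s',';'], '\''),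
   (['&','n','b','s','p',';'], Char.ofNat 160)]

def pvIsWs (ch : Char) : Bool :=
  ch == ' ' || ch == '\t' || ch == '\n' || ch == '\r' || ch == Char.ofNat 160 || PySem.Chars.isspace ch

-- ===== PORT A =====
-- _html_char_length: slices the remaining html for each entity test, unbounded find(';')
def htmlCharLenA (html : List Char) (pos : Nat) (ch : Char) : Nat :=
  if html.length ≤ pos then 1
  else if PySem.List.pyGet? html (pos : Int) == some '&' then
    match pvEntities.find? (fun ed =>
        PySem.Chars.startswith (PySem.List.slice html (some (pos : Int)) none) ed.1 && (ed.2 == ch)) with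
    | some ed => ed.1.length
    | none =>
      let s := PySem.Chars.findFrom html [';'] ((pos : Int) + 1) none
      if s ≠ -1 ∧ s - (pos : Int) < 12 then (s - (pos : Int) + 1).toNat else 1
  else 1

def loopA (html : List Char) (off : Int) : List Char → Nat → Int → Bool → Nat
  | [], hp, _, _ => hp
  | ch :: rest, hp, cp, inWs =>
    if cp < off then
      let isWs := pvIsWs ch
      let l := htmlCharLenA html hp ch
      if isWs then
        if !inWs then loopA html off rest (hp + l) (cp + 1) true
        else loopA html off rest (hp + l) cp true
      else loopA html off rest (hp + l) (cp + 1) false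
    else hp

def collapsed_to_html_offset_py (html_text : String) (decoded_text : String) (collapsed_offset : Int) : Int :=
  if collapsed_offset == 0 then 0
  else (loopA html_text.toList collapsed_offset decoded_text.toList 0 0 false : Int)

-- ===== PORT B =====
-- _char_len: offset startswith, ';' searched only in the 11-char window html[pos+1:pos+12]
def htmlCharLenB (html : List Char) (pos : Nat) (ch : Char) : Nat :=
  if pos < html.length && html[pos]? == some '&' then
    match pvEntities.find? (fun ed =>
        (ed.2 == ch) && PySem.Chars.startswith (html.drop pos) ed.1) with
    | some ed => ed.1.length
    | none =>
      let k := PySem.Chars.find (PySem.List.slice html (some ((pos : Int) + 1)) (some ((pos : Int) + 12))) [';']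
      if k ≠ -1 then (k + 2).toNat else 1
  else 1

-- inner sweep: absorb a whitespace run, returning the rest of the text and the new html pos
def skipWs (html : List Char) : List Char → Nat → List Char × Nat
  | [], hp => ([], hp)
  | ch :: rest, hp =>
    if pvIsWs ch then skipWs html rest (hp + htmlCharLenB html hp ch) else (ch :: rest, hp)

theorem skipWs_length_le (html : List Char) (dec : List Char) (hp : Nat) :
    (skipWs html dec hp).1.length ≤ dec.length := by
  induction dec generalizing hp with
  | nil => simp [skipWs]
  | cons ch rest ih =>
    simp only [skipWs]
    split
    · exact le_trans (ih _) (by simp)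
    · simp

def loopB (html : List Char) (off : Int) (dec : List Char) (hp : Nat) (cp : Int) : Nat :=
  match dec with
  | [] => hp
  | ch :: rest =>
    if cp < off then
      let l := htmlCharLenB html hp ch
      if pvIsWs ch then
        if cp + 1 < off then
          let p := skipWs html rest (hp + l)
          loopB html off p.1 p.2 (cp + 1)
        else hp + l
      else loopB html off rest (hp + l) (cp + 1)
    else hp
termination_by dec.length
decreasing_by
  · exact Nat.lt_succ_of_le (skipWs_length_le html rest (hp + l))
  · simp

def collapsed_to_html_offset_py_alt (html_text : String) (decoded_text : String) (collapsed_offset : Int) : Int :=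
  (loopB html_text.toList collapsed_offset decoded_text.toList 0 0 : Int)

-- ===== PRECONDITION & SPEC =====
def Spec_collapsed_to_html_offset_py (html_text : String) (decoded_text : String) (collapsed_offset : Int) (out : Int) : Prop := out = collapsed_to_html_offset_py_alt html_text decoded_text collapsed_offset
instance (html_text : String) (decoded_text : String) (collapsed_offset : Int) (out : Int) : Decidable (Spec_collapsed_to_html_offset_py html_text decoded_text collapsed_offset out) := by unfold Spec_collapsed_to_html_offset_py; infer_instance

-- ===== CLAIM (what is proved, stated in full; the proofs are below) =====
def Claim_equal_collapsed_to_html_offset_py : Prop := ∀ (html_text : String) (decoded_text : String) (collapsed_offset : Int), Dom_collapsed_to_html_offset_py html_text decoded_text collapsed_offset → Spec_collapsed_to_html_offset_py html_text decoded_text collapsed_offset (collapsed_to_html_offset_py html_text decoded_text collapsed_offset)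

-- ===== LEMMAS AND PROOFS =====


theorem singleton_prefix_iff (c : Char) (xs : List Char) : [c] <+: xs ↔ xs[0]? = some c := by
  cases xs with
  | nil => simp
  | cons x t => simp [List.cons_prefix_cons]; exact eq_comm

theorem prefix_drop_iff (c : Char) (l : List Char) (i : Nat) : [c] <+: l.drop i ↔ l[i]? = some c := by
  rw [singleton_prefix_iff]
  simp [List.getElem?_drop]

theorem find_take_singleton (l : List Char) (c : Char) (m : Nat) :
    PySem.Chars.find (l.take m) [c] =
      if PySem.Chars.find l [c] ≠ -1 ∧ PySem.Chars.find l [c] < (m : Int)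
      then PySem.Chars.find l [c] else -1 := by
  set f := PySem.Chars.find l [c] with hf
  by_cases hmem : c ∈ l
  · have hfne : f ≠ -1 := by
      rw [hf, Ne, PySem.Chars.find_eq_neg_one_iff, List.singleton_infix_iff]; simpa
    have hf0 : 0 ≤ f := by
      have := PySem.Chars.neg_one_le_find l [c]; omega
    obtain ⟨hpre, hmin⟩ := PySem.Chars.find_spec (s := l) (sub := [c]) hf0
    rw [prefix_drop_iff] at hpre
    by_cases hlt : f < (m : Int)
    · -- find in take m equals f
      have hmemt : c ∈ l.take m := by
        have : (l.take m)[f.toNat]? = some c := by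
          rw [List.getElem?_take]
          simp only [if_pos (by omega : f.toNat < m)]  -- maybe form differs
          exact hpre
        exact List.mem_of_getElem? this
      set k := PySem.Chars.find (l.take m) [c] with hk
      have hkne : k ≠ -1 := by
        rw [hk, Ne, PySem.Chars.find_eq_neg_one_iff, List.singleton_infix_iff]; simpa
      have hk0 : 0 ≤ k := by have := PySem.Chars.neg_one_le_find (l.take m) [c]; omega
      obtain ⟨hkpre, hkmin⟩ := PySem.Chars.find_spec (s := l.take m) (sub := [c]) hk0
      rw [prefix_drop_iff] at hkpre
      have hklen : k.toNat < m := by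
        have := List.getElem?_eq_some_iff.mp hkpre
        obtain ⟨hlt', _⟩ := this
        have := List.length_take_le m l
        omega
      have hkl : l[k.toNat]? = some c := by
        rw [List.getElem?_take] at hkpre
        rwa [if_pos hklen] at hkpre
      have h1 : f.toNat ≤ k.toNat := by
        by_contra hcon
        exact hmin k.toNat (by omega) ((prefix_drop_iff c l k.toNat).mpr hkl)
      have h2 : k.toNat ≤ f.toNat := by
        by_contra hcon
        refine hkmin f.toNat (by omega) ?_
        rw [prefix_drop_iff, List.getElem?_take, if_pos (by omega : f.toNat < m)]
        exact hpre
      rw [if_pos ⟨hfne, hlt⟩]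
      omega
    · -- no c in take m
      rw [if_neg (by tauto)]
      rw [PySem.Chars.find_eq_neg_one_iff, List.singleton_infix_iff]
      intro hmt
      obtain ⟨i, hi, hci⟩ := List.getElem_of_mem hmt
      have him : i < m := by have := List.length_take_le m l; omega
      have hsome : (l.take m)[i]? = some c := by
        rw [List.getElem?_eq_getElem hi, hci]
      have : l[i]? = some c := by
        rwa [List.getElem?_take, if_pos him] at hsome
      exact hmin i (by omega) ((prefix_drop_iff c l i).mpr this)
  · have : c ∉ l.take m := fun h => hmem (List.mem_of_mem_take h)
    rw [if_neg]
    · rw [PySem.Chars.find_eq_neg_one_iff, List.singleton_infix_iff]; simpa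
    · intro ⟨h1, _⟩
      exact h1 (by rw [hf, PySem.Chars.find_eq_neg_one_iff, List.singleton_infix_iff]; simpa)

theorem len_eq (html : List Char) (pos : Nat) (ch : Char) :
    htmlCharLenA html pos ch = htmlCharLenB html pos ch := by
  unfold htmlCharLenA htmlCharLenB
  by_cases hlen : html.length ≤ pos
  · rw [if_pos hlen, if_neg (by simp; omega)]
  · rw [not_le] at hlen
    rw [if_neg (by omega)]
    have hget : PySem.List.pyGet? html ((pos : Nat) : Int) = html[pos]? := by
      simp [PySem.List.pyGet?_natCast]
    by_cases hamp : html[pos]? = some '&'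
    · rw [hget, hamp,
          if_pos (show ((some '&' : Option Char) == some '&') = true from by decide),
          if_pos (show (decide (pos < html.length) && ((some '&' : Option Char) == some '&')) = true
            from by simp [hlen])]
      have hfun : (fun ed : List Char × Char =>
            PySem.Chars.startswith (PySem.List.slice html (some ((pos : Nat) : Int)) none) ed.1 && (ed.2 == ch))
          = (fun ed : List Char × Char => (ed.2 == ch) && PySem.Chars.startswith (html.drop pos) ed.1) := by
        funext ed
        rw [PySem.List.slice_from_natCast]
        exact Bool.and_comm _ _
      rw [hfun]
      cases hfind : pvEntities.find? (fun ed => (ed.2 == ch) && PySem.Chars.startswith (html.drop pos) ed.1) with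
      | some ed => rfl
      | none =>
        simp only
        have hcast1 : ((pos : Nat) : Int) + 1 = (((pos + 1 : Nat)) : Int) := by push_cast; ring
        have hcast12 : ((pos : Nat) : Int) + 12 = (((pos + 12 : Nat)) : Int) := by push_cast; ring
        rw [hcast1, hcast12]
        rw [PySem.Chars.findFrom_natCast html [';'] (pos + 1) (by omega)]
        rw [PySem.List.slice_natCast]
        have h11 : pos + 12 - (pos + 1) = 11 := by omega
        rw [h11, find_take_singleton]
        have hge := PySem.Chars.neg_one_le_find (html.drop (pos + 1)) [';']
        set f := PySem.Chars.find (html.drop (pos + 1)) [';'] with hf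
        by_cases h1 : f = -1
        · rw [h1]; simp
        · rw [if_neg h1]
          by_cases h2 : f < ((11 : Nat) : Int)
          · rw [if_pos (show f ≠ -1 ∧ f < ((11 : Nat) : Int) from ⟨h1, h2⟩)]
            rw [if_pos (show ¬((pos + 1 : Nat) : Int) + f = -1 ∧ ((pos + 1 : Nat) : Int) + f - (pos : Nat) < 12
                  from by constructor <;> [skip; skip] <;> push_cast <;> push_cast at h2 <;> omega)]
            rw [if_pos (show f ≠ -1 from h1)]
            push_cast
            omega
          · rw [if_neg (show ¬(¬((pos + 1 : Nat) : Int) + f = -1 ∧ ((pos + 1 : Nat) : Int) + f - (pos : Nat) < 12)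
                  from fun hc => by push_cast at hc h2; omega)]
            rw [if_neg (fun hc : f ≠ -1 ∧ f < ((11 : Nat) : Int) => h2 hc.2)]
            rw [if_neg (show ¬(-1 : Int) ≠ -1 from by simp)]
    · rw [hget, if_neg (by simpa using hamp), if_neg (by simp [hamp])]

theorem loopA_stop (html : List Char) (off : Int) (dec : List Char) (hp : Nat) (cp : Int)
    (w : Bool) (h : ¬ cp < off) : loopA html off dec hp cp w = hp := by
  cases dec <;> simp [loopA, h]

theorem loopA_ws (html : List Char) (off : Int) (dec : List Char) (hp : Nat) (cp : Int)
    (h : cp < off) :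
    loopA html off dec hp cp true
      = loopA html off (skipWs html dec hp).1 (skipWs html dec hp).2 cp false := by
  induction dec generalizing hp with
  | nil => simp [skipWs, loopA]
  | cons ch rest ih =>
    by_cases hw : pvIsWs ch
    · simp only [loopA, skipWs, hw, if_pos h, if_true, Bool.not_true, len_eq]
      exact ih _
    · simp [loopA, skipWs, hw, h]

theorem loop_eq (html : List Char) (off : Int) (dec : List Char) (hp : Nat) (cp : Int) :
    loopA html off dec hp cp false = loopB html off dec hp cp := by
  induction dec, hp, cp using loopB.induct (html := html) (off := off) with
  | case1 hp cp => simp [loopA, loopB]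
  | case2 hp cp ch rest hlt l hw hlt2 p ih =>
    rw [loopB]
    simp only [hlt, if_true, hw, if_pos hlt2]
    rw [show loopA html off (ch :: rest) hp cp false
          = loopA html off rest (hp + htmlCharLenA html hp ch) (cp + 1) true from by
        simp [loopA, hlt, hw]]
    rw [len_eq, loopA_ws html off rest _ (cp + 1) hlt2]
    exact ih
  | case3 hp cp ch rest hlt hw hnlt =>
    rw [loopB]
    simp only [hlt, if_true, hw, if_neg hnlt]
    rw [show loopA html off (ch :: rest) hp cp false
          = loopA html off rest (hp + htmlCharLenA html hp ch) (cp + 1) true from by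
        simp [loopA, hlt, hw]]
    rw [loopA_stop html off rest _ _ _ hnlt, len_eq]
  | case4 hp cp ch rest hlt l hnw ih =>
    rw [loopB]
    simp only [hlt, if_true, hnw, if_false, Bool.false_eq_true]
    rw [show loopA html off (ch :: rest) hp cp false
          = loopA html off rest (hp + htmlCharLenA html hp ch) (cp + 1) false from by
        simp [loopA, hlt, hnw]]
    rw [len_eq]
    exact ih
  | case5 hp cp ch rest hnlt => simp [loopA, loopB, hnlt]

theorem loopB_zero (html : List Char) (dec : List Char) :
    loopB html 0 dec 0 0 = 0 := by
  cases dec <;> simp [loopB]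

-- ===== VERDICT (by name: the statement is the Claim_ definition above) =====
theorem collapsed_to_html_offset_py_spec : Claim_equal_collapsed_to_html_offset_py := by
  intro h d off _
  show _ = _
  unfold collapsed_to_html_offset_py collapsed_to_html_offset_py_alt
  by_cases h0 : off = 0
  · simp [h0, loopB_zero]
  · simp only [beq_iff_eq, h0, if_false, loop_eq]
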